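-- pv_equiv track=rewrite | github.com/atvKail/solve | USE/kEGE24_25/Gorbachev2v/5.py | transform
-- ===== SOURCE A (Python) =====
-- def to_base9(n):
--     if n == 0:
--         return "0"
--     digits = []
--     while n:
--         digits.append(str(n % 9))
--         n //= 9
--     return "".join(reversed(digits))
--
-- def transform(N):
--     S = to_base9(N)
--
--     s = sum(int(d) for d in S)
--     if s % 2 == 0:
--         new_str = S + "52"
--     else:
--         if len(S) >= 2:
--             new_str = "73" + S[2:] + "44"
--         else:
--             new_str = "73" + "44"
--
--     return int(new_str, 9)
-- ===== SOURCE B (Python) =====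
-- def transform(N):
--     # count base-9 digits of N (1 for N == 0)
--     L = 1
--     t = N // 9
--     while t:
--         L += 1
--         t //= 9
--     # digit-sum of base-9 rep has the same parity as N (9 = 1 mod 2)
--     if N % 2 == 0:
--         return N * 81 + 47                                   # append "52" in base 9
--     if L >= 2:
--         return 66 * 9**L + (N % 9**(L - 2)) * 81 + 40        # "73" + S[2:] + "44"
--     return 5386                                              # "7344" in base 9
-- ===== Notes on version B (the rewrite author's own statement) =====
-- stated objective: simpler
-- what changed: Replaces the base-9 string building, slicing and re-parsing by pure integer arithmetic: a digit-count loop plus a closed-form affine map of N and a power of nine in each branch, using that the base-9 digit sum has the same parity as N.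
import Mathlib
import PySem

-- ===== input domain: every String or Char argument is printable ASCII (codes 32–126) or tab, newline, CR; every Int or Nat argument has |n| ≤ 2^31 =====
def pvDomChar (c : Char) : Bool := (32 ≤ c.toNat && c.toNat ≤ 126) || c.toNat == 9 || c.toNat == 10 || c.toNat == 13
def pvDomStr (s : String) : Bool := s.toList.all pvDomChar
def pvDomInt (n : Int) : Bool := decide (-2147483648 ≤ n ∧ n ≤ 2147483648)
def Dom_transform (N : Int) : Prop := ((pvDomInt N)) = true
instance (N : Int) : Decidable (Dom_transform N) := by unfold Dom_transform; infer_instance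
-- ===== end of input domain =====

-- B replaces A's base-9 string building/slicing/re-parsing by pure integer arithmetic
-- (parity of the digit sum = parity of N, and the string edits are affine maps on N); objective: simpler.

-- ===== PORT A =====
-- the while-loop of to_base9; fuel n.toNat+1 suffices for every n ≥ 0 (the digit count is ≤ n);
-- on n < 0 the Python loop never terminates, which Pre_transform excludes
def to_base9_loop : Nat → Int → List (List Char) → List (List Char)
  | 0, _, ds => ds
  | f + 1, n, ds =>
      if n = 0 then ds
      else to_base9_loop f (PySem.Int.floordiv n 9)
             (ds ++ [PySem.Int.toChars (PySem.Int.mod n 9)])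

-- strings carried as List Char; "".join(reversed(digits)) = Chars.join [] digits.reverse
def to_base9A (n : Int) : List Char :=
  if n = 0 then ['0']
  else PySem.Chars.join [] (to_base9_loop (n.toNat + 1) n []).reverse

-- int(d) for one char d of S: exact since S consists only of '0'..'8'
def digitVal (c : Char) : Int := (c.toNat : Int) - 48

-- int(t, 9): hand port of the base-9 parse; exact for nonempty strings of chars '0'..'8'
-- (the only strings transform ever parses)
def parse9 (t : List Char) : Int := t.foldl (fun a c => a * 9 + digitVal c) 0

def transform (N : Int) : Int :=
  let S := to_base9A N
  let s := (S.map digitVal).sum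
  if PySem.Int.mod s 2 = 0 then parse9 (S ++ ['5', '2'])
  else
    if (S.length : Int) ≥ 2 then
      parse9 (['7', '3'] ++ PySem.List.slice S (some 2) none ++ ['4', '4'])
    else parse9 (['7', '3'] ++ ['4', '4'])

-- ===== PORT B =====
-- the while-loop counting base-9 digits; fuel as in A's loop, diverges likewise for N < 0
def count_loop : Nat → Int → Int → Int
  | 0, _, L => L
  | f + 1, t, L =>
      if t = 0 then L
      else count_loop f (PySem.Int.floordiv t 9) (L + 1)

-- 9**L for the Int L ≥ 1 computed by the loop: exponent via .toNat (exact, L is never negative)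
def transform_alt (N : Int) : Int :=
  let L := count_loop (N.toNat + 1) (PySem.Int.floordiv N 9) 1
  if PySem.Int.mod N 2 = 0 then N * 81 + 47
  else
    if L ≥ 2 then 66 * (9 : Int) ^ L.toNat + PySem.Int.mod N ((9 : Int) ^ (L - 2).toNat) * 81 + 40
    else 5386

-- ===== PRECONDITION & SPEC =====
-- Pre_ excludes N < 0, on which A's while-loop never terminates (n //= 9 stalls at -1): A returns no value there.
def Pre_transform (N : Int) : Prop := 0 ≤ N
instance (N : Int) : Decidable (Pre_transform N) := by unfold Pre_transform; infer_instance
def pvWitness_transform : Int := 5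

def Spec_transform (N : Int) (out : Int) : Prop := out = transform_alt N
instance (N : Int) (out : Int) : Decidable (Spec_transform N out) := by unfold Spec_transform; infer_instance

-- ===== CLAIM (what is proved, stated in full; the proofs are below) =====
def Claim_equal_transform : Prop := ∀ (N : Int), Dom_transform N → Pre_transform N → Spec_transform N (transform N)

-- ===== LEMMAS AND PROOFS =====

-- value-level base-9 parse
def pv (a : Int) (l : List Nat) : Int := l.foldl (fun (a : Int) (d : Nat) => a * 9 + (d : Int)) a

theorem pv_append (a : Int) (l₁ l₂ : List Nat) : pv a (l₁ ++ l₂) = pv (pv a l₁) l₂ := by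
  simp [pv, List.foldl_append]

theorem pv_split (a : Int) (l : List Nat) : pv a l = a * 9 ^ l.length + pv 0 l := by
  induction l generalizing a with
  | nil => simp [pv]
  | cons d t ih =>
    simp only [pv, List.foldl_cons] at *
    rw [ih (a * 9 + (d : Int)), ih (0 * 9 + (d : Int))]
    simp only [List.length_cons, pow_succ]
    ring

theorem pv_nonneg (a : Int) (l : List Nat) (ha : 0 ≤ a) : 0 ≤ pv a l := by
  induction l generalizing a with
  | nil => simpa [pv] using ha
  | cons d t ih =>
    simp only [pv, List.foldl_cons] at *
    exact ih _ (by positivity)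

theorem pv_lt_aux (l : List Nat) (h : ∀ d ∈ l, d < 9) (a : Int) :
    pv a l < (a + 1) * 9 ^ l.length := by
  induction l generalizing a with
  | nil => simp [pv]
  | cons d t ih =>
    simp only [pv, List.foldl_cons] at *
    calc pv (a * 9 + (d : Int)) t
        < (a * 9 + (d : Int) + 1) * 9 ^ t.length :=
          ih (fun x hx => h x (List.mem_cons_of_mem _ hx)) _
      _ ≤ ((a + 1) * 9) * 9 ^ t.length := by
          have hd : (d : Int) < 9 := by exact_mod_cast h d (List.mem_cons_self)
          have : (0 : Int) < 9 ^ t.length := by positivity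
          nlinarith
      _ = (a + 1) * 9 ^ (t.length + 1) := by ring
      _ = (a + 1) * 9 ^ (d :: t).length := by simp

theorem pv_lt (l : List Nat) (h : ∀ d ∈ l, d < 9) : pv 0 l < 9 ^ l.length := by
  simpa using pv_lt_aux l h 0

theorem pv_rev_ofDigits (l : List Nat) :
    pv 0 l.reverse = ((Nat.ofDigits 9 l : Nat) : Int) := by
  induction l with
  | nil => simp [pv, Nat.ofDigits]
  | cons d t ih =>
    rw [List.reverse_cons, pv_append, ih]
    simp only [pv, List.foldl_cons, List.foldl_nil, Nat.ofDigits_cons]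
    push_cast
    ring

theorem pv_rev_digits (m : Nat) : pv 0 (Nat.digits 9 m).reverse = (m : Int) := by
  rw [pv_rev_ofDigits, Nat.ofDigits_digits]

theorem loop_eq (f : Nat) (m : Nat) (ds : List (List Char)) (hf : m < f) :
    to_base9_loop f (m : Int) ds
      = ds ++ (Nat.digits 9 m).map (fun (d : Nat) => PySem.Int.toChars (d : Int)) := by
  induction f generalizing m ds with
  | zero => omega
  | succ f ih =>
    by_cases hm : m = 0
    · subst hm; simp [to_base9_loop]
    · have hm' : (m : Int) ≠ 0 := by exact_mod_cast hm
      rw [to_base9_loop, if_neg hm', show (9 : Int) = ((9 : Nat) : Int) from rfl,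
        PySem.Int.floordiv_natCast, PySem.Int.mod_natCast,
        ih (m / 9) _ (by
          have := Nat.div_lt_self (Nat.pos_of_ne_zero hm) (by norm_num : 1 < 9)
          omega),
        Nat.digits_def' (by norm_num : 1 < 9) (Nat.pos_of_ne_zero hm)]
      simp

theorem toChars_digit (d : Nat) (hd : d < 9) :
    PySem.Int.toChars (d : Int) = [Char.ofNat (48 + d)] := by
  interval_cases d <;> decide

theorem digitVal_digit (d : Nat) (hd : d < 9) : digitVal (Char.ofNat (48 + d)) = (d : Int) := by
  interval_cases d <;> decide

-- S = to_base9A m as reversed digit chars (m > 0)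
theorem to_base9A_eq (m : Nat) (hm : 0 < m) :
    to_base9A (m : Int) = ((Nat.digits 9 m).map (fun d => Char.ofNat (48 + d))).reverse := by
  have hm' : (m : Int) ≠ 0 := by exact_mod_cast hm.ne'
  rw [to_base9A, if_neg hm']
  rw [show ((m : Int).toNat + 1) = m + 1 by simp]
  rw [loop_eq (m + 1) m [] (by omega)]
  have hmap : (Nat.digits 9 m).map (fun (d : Nat) => PySem.Int.toChars (d : Int))
      = ((Nat.digits 9 m).map (fun d => Char.ofNat (48 + d))).map (fun c => [c]) := by
    rw [List.map_map]
    exact List.map_congr_left fun d hd =>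
      toChars_digit d (Nat.digits_lt_base (by norm_num) hd)
  rw [List.nil_append, hmap, ← List.map_reverse, PySem.Chars.join_nil_singletons]

theorem parse9_map (a : Int) (l : List Nat) (h : ∀ d ∈ l, d < 9) :
    (l.map (fun d => Char.ofNat (48 + d))).foldl (fun a c => a * 9 + digitVal c) a = pv a l := by
  induction l generalizing a with
  | nil => simp [pv]
  | cons d t ih =>
    simp only [List.map_cons, List.foldl_cons, pv] at *
    rw [digitVal_digit d (h d List.mem_cons_self)]
    exact ih _ (fun x hx => h x (List.mem_cons_of_mem _ hx))

theorem count_loop_eq (f : Nat) (t : Nat) (k : Int) (hf : t < f) :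
    count_loop f (t : Int) k = k + (Nat.digits 9 t).length := by
  induction f generalizing t k with
  | zero => omega
  | succ f ih =>
    by_cases ht : t = 0
    · subst ht; simp [count_loop]
    · have ht' : (t : Int) ≠ 0 := by exact_mod_cast ht
      rw [count_loop, if_neg ht', show (9 : Int) = ((9 : Nat) : Int) from rfl,
        PySem.Int.floordiv_natCast,
        ih (t / 9) _ (by
          have := Nat.div_lt_self (Nat.pos_of_ne_zero ht) (by norm_num : 1 < 9)
          omega),
        Nat.digits_def' (by norm_num : 1 < 9) (Nat.pos_of_ne_zero ht)]
      simp
      ring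

-- ===== VERDICT (by name: the statement is the Claim_ definition above) =====
theorem dchar_val (c : Char) : digitVal c = (c.toNat : Int) - 48 := rfl

theorem transform_spec : Claim_equal_transform := by
  intro N _ hPre
  show transform N = transform_alt N
  obtain ⟨m, rfl⟩ : ∃ m : Nat, N = (m : Int) := ⟨N.toNat, (Int.toNat_of_nonneg hPre).symm⟩
  by_cases hm : m = 0
  · subst hm; decide
  have hmpos : 0 < m := Nat.pos_of_ne_zero hm
  have hlt : ∀ d ∈ Nat.digits 9 m, d < 9 := fun d hd => Nat.digits_lt_base (by norm_num) hd
  have hS : to_base9A (m : Int)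
      = (Nat.digits 9 m).reverse.map (fun d => Char.ofNat (48 + d)) := by
    rw [to_base9A_eq m hmpos, List.map_reverse]
  -- digit sum
  have hsum : ((((Nat.digits 9 m).reverse.map (fun d => Char.ofNat (48 + d))).map digitVal).sum)
      = (((Nat.digits 9 m).sum : Nat) : Int) := by
    rw [List.map_map]
    simp only [Function.comp_def]
    rw [List.map_congr_left (fun d hd =>
      digitVal_digit d (hlt d (List.mem_reverse.mp hd)))]
    rw [← Nat.cast_list_sum, List.sum_reverse]
  have hpar : (Nat.digits 9 m).sum % 2 = m % 2 := (Nat.modEq_digits_sum 2 9 (by norm_num) m).symm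
  -- B's length loop
  have hk1 : 1 ≤ (Nat.digits 9 m).length := by
    have := Nat.digits_ne_nil_iff_ne_zero (b := 9) (n := m) |>.mpr hm
    cases h : Nat.digits 9 m with
    | nil => exact absurd h this
    | cons a t => simp
  have hL : count_loop (((m : Int)).toNat + 1) (PySem.Int.floordiv (m : Int) 9) 1
      = ((Nat.digits 9 m).length : Int) := by
    rw [show ((m : Int)).toNat = m by simp, show (9 : Int) = ((9 : Nat) : Int) from rfl,
      PySem.Int.floordiv_natCast,
      count_loop_eq (m + 1) (m / 9) 1 (by
        have := Nat.div_lt_self hmpos (by norm_num : 1 < 9); omega)]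
    rw [Nat.digits_def' (by norm_num : 1 < 9) hmpos]
    simp only [List.length_cons]
    push_cast; ring
  have h2 : ((Nat.digits 9 m).sum : Int) % 2 = ((m : Int)) % 2 := by
    have := hpar; omega
  simp only [transform, transform_alt, hS, hL, hsum]
  rw [PySem.Int.mod_eq_emod_of_pos (by norm_num : (0 : Int) < 2),
    PySem.Int.mod_eq_emod_of_pos (by norm_num : (0 : Int) < 2), h2]
  by_cases heven : ((m : Int)) % 2 = 0
  · simp only [if_pos heven]
    rw [parse9, List.foldl_append, parse9_map _ _ (fun d hd => hlt d (List.mem_reverse.mp hd)),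
      pv_rev_digits]
    have c5 : (('5'.toNat : Int)) = 53 := by decide
    have c2 : (('2'.toNat : Int)) = 50 := by decide
    simp only [List.foldl_cons, List.foldl_nil, dchar_val, c5, c2]
    ring
  · simp only [if_neg heven]
    have hlen : ((Nat.digits 9 m).reverse.map (fun d => Char.ofNat (48 + d))).length
        = (Nat.digits 9 m).length := by simp
    rw [hlen]
    by_cases hk2 : ((Nat.digits 9 m).length : Int) ≥ 2
    · simp only [if_pos hk2]
      have hk2' : 2 ≤ (Nat.digits 9 m).length := by exact_mod_cast hk2
      set k := (Nat.digits 9 m).length with hk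
      -- A side: slice = drop 2
      have hslice : PySem.List.slice
          ((Nat.digits 9 m).reverse.map (fun d => Char.ofNat (48 + d))) (some 2) none
          = ((Nat.digits 9 m).reverse.drop 2).map (fun d => Char.ofNat (48 + d)) := by
        simp [pysem, List.map_drop]
      rw [hslice]
      rw [parse9, List.foldl_append, List.foldl_append]
      have hdrop_lt : ∀ d ∈ (Nat.digits 9 m).reverse.drop 2, d < 9 := fun d hd =>
        hlt d (List.mem_reverse.mp (List.mem_of_mem_drop hd))
      rw [parse9_map _ _ hdrop_lt]
      have hlendrop : ((Nat.digits 9 m).reverse.drop 2).length = k - 2 := by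
        simp [hk]
      set r := pv 0 ((Nat.digits 9 m).reverse.drop 2) with hr
      have hr0 : 0 ≤ r := pv_nonneg _ _ le_rfl
      have hrlt : r < 9 ^ (k - 2) := by
        rw [hr, ← hlendrop]; exact pv_lt _ hdrop_lt
      have hsplit : (m : Int) = pv 0 ((Nat.digits 9 m).reverse.take 2) * 9 ^ (k - 2) + r := by
        have h1 := pv_rev_digits m
        conv_lhs at h1 => rw [← List.take_append_drop 2 (Nat.digits 9 m).reverse]
        rw [pv_append, pv_split, hlendrop] at h1
        omega
      have hmod : (m : Int) % 9 ^ (k - 2) = r := by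
        rw [hsplit, add_comm, mul_comm, Int.add_mul_emod_self_left,
          Int.emod_eq_of_lt hr0 hrlt]
      have ht1 : (((k : Int)) - 2).toNat = k - 2 := by omega
      have ht2 : ((k : Int)).toNat = k := by omega
      rw [ht1, ht2, PySem.Int.mod_eq_emod_of_pos (by positivity), hmod]
      have hpow : (9 : Int) ^ (k - 2) * 81 = 9 ^ k := by
        rw [show k = (k - 2) + 2 by omega, Nat.add_sub_cancel, pow_add]
        ring
      rw [pv_split, hlendrop]
      have c7 : (('7'.toNat : Int)) = 55 := by decide
      have c3 : (('3'.toNat : Int)) = 51 := by decide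
      have c4 : (('4'.toNat : Int)) = 52 := by decide
      simp only [List.foldl_cons, List.foldl_nil, dchar_val, c7, c3, c4]
      nlinarith [hpow]
    · simp only [if_neg hk2]
      decide
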